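-- pv_equiv track=rewrite | github.com/PHAMTHUYLINH24174600106/TH-LTCB-KHDL | 07_PTlinh.py | tinh_tong
-- ===== SOURCE A (Python) =====
-- def tinh_tong(n):
--     # S4 = 1^2 + 2^2 + ... + n^2
--     S4 = 0
--     i = 1
--     while i <= n:
--         S4 += i ** 2
--         i += 1
--     # S5 = 1^3 + 3^3 + 5^3 + ... + (2n+1)^3
--     S5 = 0
--     i = 1
--     while i <= (2*n + 1):
--         S5 += i ** 3
--         i += 2
--     # S6 = 2^4 + 4^4 + 6^4 + ... + (2n)^4
--     S6 = 0
--     i = 2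
--     while i <= (2*n):
--         S6 += i ** 4
--         i += 2
--
--     return S4, S5, S6
-- ===== SOURCE B (Python) =====
-- def tinh_tong(n):
--     # Closed-form power-sum formulas; negative n gives three empty sums.
--     if n < 0:
--         return 0, 0, 0
--     S4 = n * (n + 1) * (2 * n + 1) // 6
--     m = n + 1
--     S5 = m * m * (2 * m * m - 1)
--     S6 = 8 * n * (n + 1) * (2 * n + 1) * (3 * n * n + 3 * n - 1) // 15
--     return S4, S5, S6
-- ===== Notes on version B (the rewrite author's own statement) =====
-- stated objective: faster
-- what changed: Replaced the three O(n) accumulation while-loops by closed-form polynomial formulas for each power-sum (Faulhaber identities), computed in O(1).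
import Mathlib
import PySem

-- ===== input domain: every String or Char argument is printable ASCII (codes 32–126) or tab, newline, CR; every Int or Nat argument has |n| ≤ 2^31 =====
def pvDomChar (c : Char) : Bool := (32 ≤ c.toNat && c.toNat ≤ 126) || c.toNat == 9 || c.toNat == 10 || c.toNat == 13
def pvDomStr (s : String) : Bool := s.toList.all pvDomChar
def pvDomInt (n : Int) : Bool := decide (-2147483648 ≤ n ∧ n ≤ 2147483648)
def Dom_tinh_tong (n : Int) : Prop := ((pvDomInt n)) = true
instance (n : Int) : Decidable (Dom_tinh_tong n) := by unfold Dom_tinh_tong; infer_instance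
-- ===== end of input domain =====

-- B replaces A's three O(n) while-loops by closed-form polynomial formulas (O(1)).
-- ===== PORT A =====
-- Generic port of A's while-loops: 'while i <= bound: S += i ** p; i += s+1'
-- (all three loops of A have this exact shape; p = power, s+1 = step).
def pvLoop (p s : Nat) (bound i S : Int) : Int :=
  if i ≤ bound then pvLoop p s bound (i + ((s : Int) + 1)) (S + i ^ p) else S
termination_by (bound + 1 - i).toNat
decreasing_by
  omega

def tinh_tong (n : Int) : List Int :=
  let S4 := pvLoop 2 0 n 1 0
  let S5 := pvLoop 3 1 (2 * n + 1) 1 0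
  let S6 := pvLoop 4 1 (2 * n) 2 0
  [S4, S5, S6]

-- ===== PORT B =====
def tinh_tong_alt (n : Int) : List Int :=
  if n < 0 then [0, 0, 0]
  else
    let S4 := PySem.Int.floordiv (n * (n + 1) * (2 * n + 1)) 6
    let m := n + 1
    let S5 := m * m * (2 * m * m - 1)
    let S6 := PySem.Int.floordiv (8 * n * (n + 1) * (2 * n + 1) * (3 * n * n + 3 * n - 1)) 15
    [S4, S5, S6]

-- ===== PRECONDITION & SPEC =====
def Spec_tinh_tong (n : Int) (out : List Int) : Prop := out = tinh_tong_alt n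
instance (n : Int) (out : List Int) : Decidable (Spec_tinh_tong n out) := by unfold Spec_tinh_tong; infer_instance

-- ===== CLAIM (what is proved, stated in full; the proofs are below) =====
def Claim_equal_tinh_tong : Prop := ∀ (n : Int), Dom_tinh_tong n → Spec_tinh_tong n (tinh_tong n)

-- ===== LEMMAS AND PROOFS =====

-- sum of k terms i^p, (i+step)^p, …, appended at the back
def pvSum (p s : Nat) (i : Int) : Nat → Int
  | 0 => 0
  | k + 1 => pvSum p s i k + (i + (k : Int) * ((s : Int) + 1)) ^ p

theorem pvSum_peel (p s : Nat) (i : Int) (k : Nat) :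
    pvSum p s i (k + 1) = i ^ p + pvSum p s (i + ((s : Int) + 1)) k := by
  induction k with
  | zero => simp [pvSum]
  | succ k ih =>
      rw [show k + 1 + 1 = (k + 1) + 1 from rfl]
      unfold pvSum
      rw [ih]
      push_cast
      ring

theorem pvLoop_eq (p s : Nat) (k : Nat) :
    ∀ (bound i S : Int), bound < i + (k : Int) * ((s : Int) + 1) →
      (k ≠ 0 → i + ((k : Int) - 1) * ((s : Int) + 1) ≤ bound) →
      pvLoop p s bound i S = S + pvSum p s i k := by
  induction k with
  | zero =>
      intro bound i S h1 _
      unfold pvLoop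
      rw [if_neg (by push_cast at h1; omega)]
      simp [pvSum]
  | succ k ih =>
      intro bound i S h1 h2
      have hle : i ≤ bound := by
        have := h2 (by omega)
        push_cast at this ⊢
        nlinarith [Nat.cast_nonneg (α := ℤ) k, Nat.cast_nonneg (α := ℤ) s]
      unfold pvLoop
      rw [if_pos hle]
      rw [ih bound (i + ((s : Int) + 1)) (S + i ^ p)
          (by push_cast at h1 ⊢; linarith)
          (fun hk => by
            have := h2 (by omega)
            push_cast at this ⊢
            linarith)]
      rw [pvSum_peel]
      ring

theorem pvSum2 (k : Nat) : 6 * pvSum 2 0 1 k = (k : Int) * (k + 1) * (2 * k + 1) := by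
  induction k with
  | zero => simp [pvSum]
  | succ k ih =>
      unfold pvSum
      push_cast
      push_cast at ih
      linear_combination ih

theorem pvSum3 (k : Nat) : pvSum 3 1 1 k = (k : Int) * k * (2 * (k : Int) * k - 1) := by
  induction k with
  | zero => simp [pvSum]
  | succ k ih =>
      unfold pvSum
      push_cast
      push_cast at ih
      linear_combination ih

theorem pvSum4 (k : Nat) :
    15 * pvSum 4 1 2 k = 8 * (k : Int) * (k + 1) * (2 * k + 1) * (3 * k * k + 3 * k - 1) := by
  induction k with
  | zero => simp [pvSum]
  | succ k ih =>
      unfold pvSum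
      push_cast
      push_cast at ih
      linear_combination ih

theorem pv_fdiv_exact (a b q : Int) (hb : 0 < b) (h : b * q = a) :
    PySem.Int.floordiv a b = q := by
  rw [PySem.Int.floordiv_eq_iff_of_pos hb]
  constructor <;> nlinarith

-- ===== VERDICT (by name: the statement is the Claim_ definition above) =====
theorem tinh_tong_spec : Claim_equal_tinh_tong := by
  intro n _
  unfold Spec_tinh_tong tinh_tong tinh_tong_alt
  by_cases hn : n < 0
  · rw [if_pos hn]
    have z4 := pvLoop_eq 2 0 0 n 1 0 (by push_cast; omega) (by omega)
    have z5 := pvLoop_eq 3 1 0 (2 * n + 1) 1 0 (by push_cast; omega) (by omega)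
    have z6 := pvLoop_eq 4 1 0 (2 * n) 2 0 (by push_cast; omega) (by omega)
    simp [pvSum] at z4 z5 z6
    simp [z4, z5, z6]
  · rw [if_neg hn]
    replace hn : 0 ≤ n := Int.not_lt.mp hn
    obtain ⟨k, hk⟩ : ∃ k : Nat, (k : Int) = n := ⟨n.toNat, Int.toNat_of_nonneg hn⟩
    subst hk
    have h4 := pvLoop_eq 2 0 k (k : Int) 1 0 (by push_cast; omega) (fun _ => by push_cast; omega)
    have h5 := pvLoop_eq 3 1 (k + 1) (2 * (k : Int) + 1) 1 0 (by push_cast; omega)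
        (fun _ => by push_cast; omega)
    have h6 := pvLoop_eq 4 1 k (2 * (k : Int)) 2 0 (by push_cast; omega)
        (fun hk0 => by
          have : 1 ≤ (k : Int) := by exact_mod_cast Nat.one_le_iff_ne_zero.mpr hk0
          push_cast; omega)
    rw [h4, h5, h6]
    have e4 : PySem.Int.floordiv ((k : Int) * ((k : Int) + 1) * (2 * (k : Int) + 1)) 6
        = pvSum 2 0 1 k := pv_fdiv_exact _ _ _ (by omega) (by linear_combination pvSum2 k)
    have e6 : PySem.Int.floordiv
        (8 * (k : Int) * ((k : Int) + 1) * (2 * (k : Int) + 1) * (3 * (k : Int) * (k : Int) + 3 * (k : Int) - 1)) 15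
        = pvSum 4 1 2 k := pv_fdiv_exact _ _ _ (by omega) (by linear_combination pvSum4 k)
    simp only [zero_add, e4, e6]
    rw [pvSum3]
    push_cast
    ring_nf
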